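-- pv_equiv track=rewrite | github.com/ModelOriented/AI-strategies-papers-regulations-monitoring | scripts/overton/parse_pdfs.py | paragraph_management
-- ===== SOURCE A (Python) =====
-- import copy
--
-- def nwords(string):
--     return len(string.split())
--
-- def paragraph_management(paragraphs, treshold=60):
--     ls = copy.deepcopy(paragraphs)
--     for i in range(len(ls)):  # document
--         for j in range(len(ls[i])-1):  # paragraph
--             if(nwords(ls[i][j]) < treshold):
--                 ls[i][j+1] = ls[i][j] + ' ' + ls[i][j+1]
--                 ls[i][j] = ''
--         ls[i] = [s for s in ls[i] if s != '']
--     return ls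
-- ===== SOURCE B (Python) =====
-- def paragraph_management(paragraphs, treshold=60):
--     result = []
--     for doc in paragraphs:
--         merged = []
--         parts = None  # pieces of the paragraph being built
--         count = 0     # word count of ' '.join(parts), maintained incrementally
--         for p in doc:
--             w = len(p.split())
--             if parts is None:
--                 parts, count = [p], w
--             elif count < treshold:
--                 parts.append(p)
--                 count += w
--             else:
--                 merged.append(' '.join(parts))
--                 parts, count = [p], w
--         if parts is not None:
--             merged.append(' '.join(parts))
--         result.append([s for s in merged if s != ''])
--     return result
-- ===== Notes on version B (the rewrite author's own statement) =====
-- stated objective: faster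
-- what changed: Single left-to-right pass per document keeping a running word count and a list of pieces joined once on flush, instead of re-splitting and re-concatenating the growing merged string at every index of the original list.
import Mathlib
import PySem

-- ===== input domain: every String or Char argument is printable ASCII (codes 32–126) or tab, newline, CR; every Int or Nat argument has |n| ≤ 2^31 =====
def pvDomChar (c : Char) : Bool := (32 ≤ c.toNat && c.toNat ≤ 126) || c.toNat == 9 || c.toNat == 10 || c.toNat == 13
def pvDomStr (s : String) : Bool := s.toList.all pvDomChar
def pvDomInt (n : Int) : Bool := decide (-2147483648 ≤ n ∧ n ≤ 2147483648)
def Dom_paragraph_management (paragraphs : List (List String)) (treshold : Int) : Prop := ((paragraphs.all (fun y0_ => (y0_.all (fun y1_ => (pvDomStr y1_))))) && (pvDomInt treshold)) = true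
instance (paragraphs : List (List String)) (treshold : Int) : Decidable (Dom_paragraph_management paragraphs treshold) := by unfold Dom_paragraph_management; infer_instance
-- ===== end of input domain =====

-- B replaces A's per-index re-split/re-concatenation of the growing merged paragraph by one
-- left-to-right pass per document with an incrementally maintained word count and piece list
-- (objective: faster; A does not mutate its argument — it deep-copies first).


-- ===== PORT A =====
-- nwords(string) = len(string.split())
def pmNwords (s : String) : Int := ((PySem.Str.split₀ s).length : Int)

-- the body of A's inner loop at index j (list indices are in range whenever j < len-1,
-- so getD's default is never read)
def pmStepA (treshold : Int) (ls : List String) (j : Nat) : List String :=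
  if pmNwords (ls.getD j "") < treshold then
    (ls.set (j+1) (ls.getD j "" ++ " " ++ ls.getD (j+1) "")).set j ""
  else ls

def paragraph_management (paragraphs : List (List String)) (treshold : Int) : List (List String) :=
  -- ls = copy.deepcopy(paragraphs); for i …: for j in range(len(ls[i])-1): …; ls[i] = filter
  paragraphs.map (fun doc =>
    ((List.range (doc.length - 1)).foldl (pmStepA treshold) doc).filter (fun s => s ≠ ""))

-- ===== PORT B =====
-- ' '.join(parts)
def pmFlush (parts : List String) : String := PySem.Str.join " " parts

-- B's inner loop, after the first paragraph has initialised parts/count: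
-- parts = pieces of the paragraph being built, count = word count of ' '.join(parts)
def pmLoopB (treshold : Int) (parts : List String) (count : Int) : List String → List String
  | [] => [pmFlush parts]
  | p :: rest =>
    if count < treshold then pmLoopB treshold (parts ++ [p]) (count + pmNwords p) rest
    else pmFlush parts :: pmLoopB treshold [p] (pmNwords p) rest

def paragraph_management_alt (paragraphs : List (List String)) (treshold : Int) : List (List String) :=
  paragraphs.map (fun doc =>
    match doc with
    | [] => []
    | p :: rest => (pmLoopB treshold [p] (pmNwords p) rest).filter (fun s => s ≠ ""))

-- ===== PRECONDITION & SPEC =====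
def Spec_paragraph_management (paragraphs : List (List String)) (treshold : Int) (out : List (List String)) : Prop := out = paragraph_management_alt paragraphs treshold
instance (paragraphs : List (List String)) (treshold : Int) (out : List (List String)) : Decidable (Spec_paragraph_management paragraphs treshold out) := by unfold Spec_paragraph_management; infer_instance

-- ===== CLAIM (what is proved, stated in full; the proofs are below) =====
def Claim_equal_paragraph_management : Prop := ∀ (paragraphs : List (List String)) (treshold : Int), Dom_paragraph_management paragraphs treshold → Spec_paragraph_management paragraphs treshold (paragraph_management paragraphs treshold)

-- ===== LEMMAS AND PROOFS =====

-- Characterisation of A's inner loop as a structural recursion.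
def pmG (t : Int) : List String → List String
  | [] => []
  | [x] => [x]
  | x :: y :: rest =>
    if pmNwords x < t then "" :: pmG t ((x ++ " " ++ y) :: rest)
    else x :: pmG t (y :: rest)
  termination_by l => l.length

-- list index helpers
theorem pm_getD_append_len (pre l : List String) (d : String) :
    (pre ++ l).getD pre.length d = l.getD 0 d := by
  induction pre with
  | nil => simp
  | cons a pre ih => simpa using ih

theorem pm_set_append_len (pre l : List String) (k : Nat) (a : String) :
    (pre ++ l).set (pre.length + k) a = pre ++ l.set k a := by
  induction pre with
  | nil => simp
  | cons b pre ih => simpa [Nat.succ_add] using ih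

-- A's indexed fold, started after an untouched prefix, equals pmG on the suffix.
theorem pm_loopA_eq_pmG (t : Int) :
    ∀ (n : Nat) (suf pre : List String), suf.length ≤ n →
      (List.range' pre.length (suf.length - 1)).foldl (pmStepA t) (pre ++ suf) = pre ++ pmG t suf := by
  intro n
  induction n with
  | zero =>
    intro suf pre h
    have : suf = [] := List.eq_nil_of_length_eq_zero (Nat.le_zero.mp h)
    subst this; simp [pmG]
  | succ n ih =>
    intro suf pre h
    match suf with
    | [] => simp [pmG]
    | [x] => simp [pmG]
    | x :: y :: rest =>
      have hrange : List.range' pre.length ((x :: y :: rest).length - 1)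
          = pre.length :: List.range' (pre.length + 1) ((y :: rest).length - 1) := by
        simp [List.range'_succ]
      rw [hrange]
      have hx : (pre ++ x :: y :: rest).getD pre.length "" = x := by
        simpa using pm_getD_append_len pre (x :: y :: rest) ""
      have hy : (pre ++ x :: y :: rest).getD (pre.length + 1) "" = y := by
        have := pm_getD_append_len (pre ++ [x]) (y :: rest) ""
        simpa using this
      by_cases hc : pmNwords x < t
      · have hstep : pmStepA t (pre ++ x :: y :: rest) pre.length
            = (pre ++ [""]) ++ (x ++ " " ++ y) :: rest := by
          have h1 : (pre ++ x :: y :: rest).set (pre.length + 1) (x ++ " " ++ y)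
              = pre ++ x :: (x ++ " " ++ y) :: rest := by
            simpa using pm_set_append_len pre (x :: y :: rest) 1 (x ++ " " ++ y)
          have h2 : (pre ++ x :: (x ++ " " ++ y) :: rest).set (pre.length + 0) ""
              = pre ++ "" :: (x ++ " " ++ y) :: rest := by
            simpa using pm_set_append_len pre (x :: (x ++ " " ++ y) :: rest) 0 ""
          simp only [pmStepA, hx, hy, if_pos hc, h1]
          simpa using h2
        have hlen : ((x ++ " " ++ y) :: rest).length ≤ n := by
          simp at h ⊢; omega
        have := ih ((x ++ " " ++ y) :: rest) (pre ++ [""]) hlen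
        simp only [List.foldl_cons, hstep]
        have hpl : (pre ++ [""]).length = pre.length + 1 := by simp
        rw [← hpl]
        simp only [List.length_cons, Nat.add_sub_cancel] at this ⊢
        rw [this]
        simp [pmG, if_pos hc]
      · have hstep : pmStepA t (pre ++ x :: y :: rest) pre.length = (pre ++ [x]) ++ y :: rest := by
          simp [pmStepA, hx, hy, if_neg hc]
        have hlen : (y :: rest).length ≤ n := by simp at h ⊢; omega
        have := ih (y :: rest) (pre ++ [x]) hlen
        simp only [List.foldl_cons, hstep]
        have hpl : (pre ++ [x]).length = pre.length + 1 := by simp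
        rw [← hpl]
        simp only [List.length_cons, Nat.add_sub_cancel] at this ⊢
        rw [this]
        simp [pmG, if_neg hc]

-- ----- word counting -----
-- word count of the split₀ scanner's remaining input given the current buffer
def pmWC : List Char → List Char → Nat
  | [], cur => if cur.isEmpty then 0 else 1
  | c :: rest, cur =>
    if PySem.Chars.isspace c then (if cur.isEmpty then pmWC rest [] else 1 + pmWC rest [])
    else pmWC rest (c :: cur)

theorem pm_go_length : ∀ (s cur : List Char) (acc : List (List Char)),
    (PySem.Chars.split₀.go s cur acc).length = acc.length + pmWC s cur := by
  intro s
  induction s with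
  | nil => intro cur acc; by_cases h : cur.isEmpty <;> simp [PySem.Chars.split₀.go, pmWC, h]
  | cons c rest ih =>
    intro cur acc
    by_cases hs : PySem.Chars.isspace c
    · by_cases h : cur.isEmpty <;>
        simp [PySem.Chars.split₀.go, pmWC, hs, h, ih] <;> omega
    · simp [PySem.Chars.split₀.go, pmWC, hs, ih]

theorem pm_wc_append (b : List Char) : ∀ (a cur : List Char),
    pmWC (a ++ ' ' :: b) cur = pmWC a cur + pmWC b [] := by
  intro a
  induction a with
  | nil =>
    intro cur
    have : PySem.Chars.isspace ' ' = true := by decide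
    by_cases h : cur.isEmpty <;> simp [pmWC, this, h] <;> omega
  | cons c rest ih =>
    intro cur
    by_cases hs : PySem.Chars.isspace c
    · by_cases h : cur.isEmpty <;> simp [pmWC, hs, h, ih] <;> omega
    · simp [pmWC, hs, ih]

theorem pm_nwords_toList (s : String) : pmNwords s = ((pmWC s.toList []) : Int) := by
  simp [pmNwords, PySem.Str.split₀, PySem.Chars.split₀, pm_go_length]

theorem pm_nwords_concat (x y : String) :
    pmNwords (x ++ " " ++ y) = pmNwords x + pmNwords y := by
  rw [pm_nwords_toList, pm_nwords_toList, pm_nwords_toList]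
  have h : (x ++ " " ++ y).toList = x.toList ++ ' ' :: y.toList := by simp
  rw [h, pm_wc_append]
  push_cast; ring

-- ----- flush (' '.join) -----
theorem pm_intercalate_snoc (sep a : List Char) :
    ∀ (l : List (List Char)), l ≠ [] →
      List.intercalate sep (l ++ [a]) = List.intercalate sep l ++ sep ++ a := by
  intro l
  induction l with
  | nil => intro h; exact absurd rfl h
  | cons x l ih =>
    intro _
    match l with
    | [] => simp [List.intercalate, List.intersperse]
    | y :: l' =>
      have := ih (by simp)
      simp only [List.intercalate, List.cons_append, List.intersperse] at this ⊢
      simp_all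

theorem pm_flush_singleton (x : String) : pmFlush [x] = x := by
  simp [pmFlush, PySem.Str.join, PySem.Chars.join, List.intercalate]

theorem pm_flush_snoc (parts : List String) (p : String) (h : parts ≠ []) :
    pmFlush (parts ++ [p]) = pmFlush parts ++ " " ++ p := by
  simp only [pmFlush, PySem.Str.join, PySem.Chars.join, List.map_append, List.map_cons,
    List.map_nil]
  rw [pm_intercalate_snoc _ _ _ (by simpa using h)]
  have : (" " : String).toList = [' '] := by decide
  apply String.toList_injective
  simp [this]

-- ----- B's loop equals the filtered pmG -----
theorem pm_loopB_eq (t : Int) :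
    ∀ (rest parts : List String), parts ≠ [] →
      (pmG t (pmFlush parts :: rest)).filter (fun s => s ≠ "")
        = (pmLoopB t parts (pmNwords (pmFlush parts)) rest).filter (fun s => s ≠ "") := by
  intro rest
  induction rest with
  | nil => intro parts _; simp [pmG, pmLoopB]
  | cons y rest ih =>
    intro parts hne
    by_cases hc : pmNwords (pmFlush parts) < t
    · have hflu : pmFlush parts ++ " " ++ y = pmFlush (parts ++ [y]) :=
        (pm_flush_snoc parts y hne).symm
      have hcnt : pmNwords (pmFlush parts) + pmNwords y = pmNwords (pmFlush (parts ++ [y])) := by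
        rw [← hflu, pm_nwords_concat]
      have := ih (parts ++ [y]) (by simp)
      simp only [pmG, pmLoopB, if_pos hc]
      rw [hflu, hcnt]
      simpa using this
    · have := ih [y] (by simp)
      rw [pm_flush_singleton] at this
      simp only [pmG, pmLoopB, if_neg hc, List.filter_cons]
      rw [this]

-- ===== VERDICT (by name: the statement is the Claim_ definition above) =====
theorem paragraph_management_spec : Claim_equal_paragraph_management := by
  intro paragraphs treshold _
  unfold Spec_paragraph_management paragraph_management paragraph_management_alt
  apply List.map_congr_left
  intro doc _
  have hA : (List.range (doc.length - 1)).foldl (pmStepA treshold) doc = pmG treshold doc := by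
    have := pm_loopA_eq_pmG treshold doc.length doc [] (le_refl _)
    simpa [List.range_eq_range'] using this
  rw [hA]
  match doc with
  | [] => simp [pmG]
  | p :: rest =>
    have := pm_loopB_eq treshold rest [p] (by simp)
    rw [pm_flush_singleton] at this
    simpa using this
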